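-- pv_equiv track=rewrite | github.com/rsbyrne/everest | everest/bythic/dimensions/slices.py | selinds_iter
-- ===== SOURCE A (Python) =====
-- def selinds_iter(arb, inds):
--     it = iter(inds)
--     try:
--         ind = next(it)
--         for i, a in enumerate(arb):
--             if i == ind:
--                 yield a
--                 ind = next(it)
--     except StopIteration:
--         return
-- ===== SOURCE B (Python) =====
-- def selinds_iter(arb, inds):
--     it = iter(arb)
--     cur = 0
--     for ind in inds:
--         if ind < cur:
--             return
--         try:
--             for _ in range(ind - cur):
--                 next(it)
--             yield next(it)
--         except StopIteration:
--             return
--         cur = ind + 1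
-- ===== Notes on version B (the rewrite author's own statement) =====
-- stated objective: alternative
-- what changed: B iterates over the target indices, skipping ahead in a single arb iterator by the gap to each next index and stopping as soon as an index is behind the cursor or arb is exhausted, instead of scanning every element of arb and testing each position against the current index.
import Mathlib
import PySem

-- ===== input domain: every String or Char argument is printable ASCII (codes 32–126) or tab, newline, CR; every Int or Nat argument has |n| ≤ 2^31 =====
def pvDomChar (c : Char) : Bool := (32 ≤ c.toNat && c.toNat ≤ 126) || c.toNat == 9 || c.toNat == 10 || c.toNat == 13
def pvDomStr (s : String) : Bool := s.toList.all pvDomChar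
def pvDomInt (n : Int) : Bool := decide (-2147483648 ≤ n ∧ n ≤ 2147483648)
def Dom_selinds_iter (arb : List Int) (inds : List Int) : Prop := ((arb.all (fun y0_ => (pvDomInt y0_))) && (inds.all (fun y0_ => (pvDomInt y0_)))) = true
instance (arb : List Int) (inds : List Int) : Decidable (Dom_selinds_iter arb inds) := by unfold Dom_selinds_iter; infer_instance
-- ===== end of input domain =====

-- B drives by the target indices, skipping ahead in arb, instead of scanning all of arb
-- and testing each position; equal return values (both are generators, no side effects).
-- ===== PORT A =====
-- scan arb with enumerate; when i == ind, yield and fetch the next target; StopIteration ends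
def selA : List Int → Int → Int → List Int → List Int
  | [], _, _, _ => []
  | a :: t, i, ind, rest =>
    if i = ind then
      a :: (match rest with
            | [] => []                      -- next(it) raises StopIteration
            | ind' :: rest' => selA t (i + 1) ind' rest')
    else selA t (i + 1) ind rest

def selinds_iter (arb : List Int) (inds : List Int) : List Int :=
  match inds with
  | [] => []                                -- first next(it) raises StopIteration
  | ind :: rest => selA arb 0 ind rest

-- ===== PORT B =====
-- 'for _ in range(n): next(it)' — skip n elements, none = StopIteration
def skipB : Nat → List Int → Option (List Int)
  | 0, xs => some xs
  | _ + 1, [] => none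
  | n + 1, _ :: xs => skipB n xs

def selB : List Int → Int → List Int → List Int
  | _, _, [] => []
  | arbRem, cur, ind :: rest =>
    if ind < cur then []                    -- no later position can match: return
    else
      match skipB (ind - cur).toNat arbRem with
      | none => []                          -- StopIteration while skipping
      | some [] => []                       -- StopIteration on yield's next(it)
      | some (a :: arbRem') => a :: selB arbRem' (ind + 1) rest

def selinds_iter_alt (arb : List Int) (inds : List Int) : List Int :=
  selB arb 0 inds

-- ===== PRECONDITION & SPEC =====
def Spec_selinds_iter (arb : List Int) (inds : List Int) (out : List Int) : Prop := out = selinds_iter_alt arb inds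
instance (arb : List Int) (inds : List Int) (out : List Int) : Decidable (Spec_selinds_iter arb inds out) := by unfold Spec_selinds_iter; infer_instance

-- ===== CLAIM (what is proved, stated in full; the proofs are below) =====
def Claim_equal_selinds_iter : Prop := ∀ (arb : List Int) (inds : List Int), Dom_selinds_iter arb inds → Spec_selinds_iter arb inds (selinds_iter arb inds)

-- ===== LEMMAS AND PROOFS =====

-- ===== VERDICT (by name: the statement is the Claim_ definition above) =====
theorem selA_eq_selB : ∀ (arb : List Int) (i ind : Int) (rest : List Int),
    selA arb i ind rest = selB arb i (ind :: rest) := by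
  intro arb
  induction arb with
  | nil =>
    intro i ind rest
    simp only [selA, selB]
    split
    · rfl
    · rcases h : (ind - i).toNat with _ | n <;> simp [skipB]
  | cons a t ih =>
    intro i ind rest
    by_cases h : i = ind
    · subst h
      have h0 : (i - i).toNat = 0 := by omega
      simp only [selA, selB, if_neg (by omega : ¬ i < i), h0, skipB, if_true]
      cases rest with
      | nil => simp [selB]
      | cons ind' rest' => simp [ih]
    · simp only [selA, if_neg h]
      rw [ih]
      by_cases hlt : ind < i
      · simp only [selB, if_pos hlt, if_pos (by omega : ind < i + 1)]
      · have hk : (ind - i).toNat = (ind - (i + 1)).toNat + 1 := by omega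
        simp only [selB, if_neg hlt, if_neg (by omega : ¬ ind < i + 1), hk, skipB]

theorem selinds_iter_spec : Claim_equal_selinds_iter := by
  intro arb inds _
  unfold Spec_selinds_iter selinds_iter selinds_iter_alt
  cases inds with
  | nil => simp [selB]
  | cons ind rest => exact selA_eq_selB arb 0 ind rest
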